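-- pv_equiv track=rewrite | github.com/IoannisMizithrasnyc/Undergraduate_research_project | Undergraduate research project - implementation.py | same_item_variables_checker
-- ===== SOURCE A (Python) =====
-- def same_item_variables_checker(unckecked_catalogue):
--
--     string_combiner = " / "
--     approved_catalogue = [[],[],[]]
--     approved_catalogue[0].append(unckecked_catalogue[0][0])
--     approved_catalogue[1].append(unckecked_catalogue[1][0])
--     approved_catalogue[2].append(unckecked_catalogue[2][0])
--
--     for unckecked_catalogue_index in range(0,len(unckecked_catalogue[identification_position_in_list])): ###range should start at 1 cause we already appened one row
--         match_found = False
--         for approved_catalogue_index in range(0,len(approved_catalogue[identification_position_in_list])):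
--             if unckecked_catalogue[value_positions_in_list][unckecked_catalogue_index] == approved_catalogue[value_positions_in_list][approved_catalogue_index] \
--                and unckecked_catalogue[constrain_positions_in_list][unckecked_catalogue_index] == approved_catalogue[constrain_positions_in_list][approved_catalogue_index]:
--                     if approved_catalogue[identification_position_in_list][approved_catalogue_index] != unckecked_catalogue[identification_position_in_list][unckecked_catalogue_index]:
--                         approved_catalogue[identification_position_in_list][approved_catalogue_index] = approved_catalogue[identification_position_in_list][approved_catalogue_index] + string_combiner\
--                                                                                                         + unckecked_catalogue[identification_position_in_list][unckecked_catalogue_index]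
--                     match_found = True
--                     break
--         if not match_found:
--             approved_catalogue[identification_position_in_list].append(unckecked_catalogue[identification_position_in_list][unckecked_catalogue_index])
--             approved_catalogue[value_positions_in_list].append(unckecked_catalogue[value_positions_in_list][unckecked_catalogue_index])
--             approved_catalogue[constrain_positions_in_list].append(unckecked_catalogue[constrain_positions_in_list][unckecked_catalogue_index])
--
--     return approved_catalogue
--
-- identification_position_in_list = 0
--
-- value_positions_in_list = 1
--
-- constrain_positions_in_list = 2
-- ===== SOURCE B (Python) =====
-- def same_item_variables_checker(unckecked_catalogue):
--     # Group-then-reduce: one grouping pass collecting every identification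
--     # string per (value, constraint) key, then a per-group reduction pass.
--     string_combiner = " / "
--     ids = unckecked_catalogue[0]
--     vals = unckecked_catalogue[1]
--     cons = unckecked_catalogue[2]
--     groups = {}
--     for i in range(len(ids)):
--         groups.setdefault((vals[i], cons[i]), []).append(ids[i])
--
--     def merge(members):
--         merged = members[0]
--         for s in members[1:]:
--             if merged != s:
--                 merged = merged + string_combiner + s
--         return merged
--
--     return [[merge(ms) for ms in groups.values()],
--             [v for (v, c) in groups],
--             [c for (v, c) in groups]]
-- ===== Notes on version B (the rewrite author's own statement) =====
-- stated objective: alternative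
-- what changed: Replaces A's online maintenance of an approved catalogue (inner rescan plus in-place merge on every row) with a staged group-then-reduce: one pass buckets all identification strings per (value, constraint) key, then each bucket is reduced independently to its merged string.
import Mathlib
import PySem

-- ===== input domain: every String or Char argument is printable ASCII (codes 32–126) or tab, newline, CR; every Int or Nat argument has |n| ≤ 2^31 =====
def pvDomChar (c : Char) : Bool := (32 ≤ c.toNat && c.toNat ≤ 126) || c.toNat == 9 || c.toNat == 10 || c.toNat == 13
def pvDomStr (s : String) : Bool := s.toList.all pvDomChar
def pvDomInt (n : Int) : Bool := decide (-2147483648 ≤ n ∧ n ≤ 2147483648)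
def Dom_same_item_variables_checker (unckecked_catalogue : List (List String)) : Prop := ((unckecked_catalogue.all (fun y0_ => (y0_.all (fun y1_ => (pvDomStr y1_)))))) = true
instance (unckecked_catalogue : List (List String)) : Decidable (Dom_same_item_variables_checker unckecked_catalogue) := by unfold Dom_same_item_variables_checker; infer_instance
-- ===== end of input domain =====

-- B restructures A's online approved-catalogue maintenance into a staged
-- group-then-reduce: bucket all identification strings per (value, constraint)
-- key, then reduce each bucket independently (objective: alternative).


-- ===== PORT A =====
-- A's inner loop over the approved catalogue indices, with break: first index k
-- in ks whose (value, constraint) matches. (All indices are in range on Pre_;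
-- getD's default is never consulted there.)
def aFindIdx (uval ucon : String) (vals cons : List String) : List Nat → Option Nat
  | [] => none
  | k :: ks =>
      if vals.getD k "" == uval && cons.getD k "" == ucon then some k
      else aFindIdx uval ucon vals cons ks

-- one iteration of A's outer loop; state = (ids, vals, cons) of the approved catalogue
def aStep (u0 u1 u2 : List String) (st : List String × List String × List String)
    (i : Nat) : List String × List String × List String :=
  let ids := st.1; let vals := st.2.1; let cons := st.2.2
  match aFindIdx (u1.getD i "") (u2.getD i "") vals cons (List.range ids.length) with
  | some j =>
      if ids.getD j "" == u0.getD i "" then (ids, vals, cons)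
      else (ids.set j (ids.getD j "" ++ " / " ++ u0.getD i ""), vals, cons)
  | none => (ids ++ [u0.getD i ""], vals ++ [u1.getD i ""], cons ++ [u2.getD i ""])

def same_item_variables_checker (unckecked_catalogue : List (List String)) : List (List String) :=
  let u0 := unckecked_catalogue.getD 0 []
  let u1 := unckecked_catalogue.getD 1 []
  let u2 := unckecked_catalogue.getD 2 []
  let fin := (List.range u0.length).foldl (aStep u0 u1 u2)
      ([u0.getD 0 ""], [u1.getD 0 ""], [u2.getD 0 ""])
  [fin.1, fin.2.1, fin.2.2]

-- ===== PORT B =====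
-- B's per-group reduction: merged = members[0]; for s in members[1:]: …
def mergeStep (acc s : String) : String := if acc == s then acc else acc ++ " / " ++ s

-- members is never empty (every bucket got at least one append), so headD's
-- default is never consulted on Pre_.
def mergeAll (members : List String) : String := members.tail.foldl mergeStep (members.headD "")

def same_item_variables_checker_alt (unckecked_catalogue : List (List String)) : List (List String) :=
  let u0 := unckecked_catalogue.getD 0 []
  let u1 := unckecked_catalogue.getD 1 []
  let u2 := unckecked_catalogue.getD 2 []
  -- grouping pass: groups.setdefault((vals[i], cons[i]), []).append(ids[i])
  let groups := (List.range u0.length).foldl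
      (fun (d : PySem.Dict (String × String) (List String)) i =>
        d.modify (u1.getD i "", u2.getD i "") [] (· ++ [u0.getD i ""]))
      PySem.Dict.empty
  -- reduction pass: three comprehensions over the finished groups
  [groups.values.map mergeAll,
   groups.keys.map (fun k => k.1),
   groups.keys.map (fun k => k.2)]

-- ===== PRECONDITION & SPEC =====
-- Pre_ = exactly the inputs on which the Python A returns (otherwise it raises
-- IndexError: fewer than 3 rows, an empty first row, or a value/constraint row
-- shorter than the identification row).
def Pre_same_item_variables_checker (unckecked_catalogue : List (List String)) : Prop :=
  3 ≤ unckecked_catalogue.length ∧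
  1 ≤ (unckecked_catalogue.getD 0 []).length ∧
  (unckecked_catalogue.getD 0 []).length ≤ (unckecked_catalogue.getD 1 []).length ∧
  (unckecked_catalogue.getD 0 []).length ≤ (unckecked_catalogue.getD 2 []).length
instance (unckecked_catalogue : List (List String)) : Decidable (Pre_same_item_variables_checker unckecked_catalogue) := by unfold Pre_same_item_variables_checker; infer_instance

def pvWitness_same_item_variables_checker : List (List String) := [["a", "b", "a"], ["1", "1", "1"], ["x", "x", "x"]]

def Spec_same_item_variables_checker (unckecked_catalogue : List (List String)) (out : List (List String)) : Prop := out = same_item_variables_checker_alt unckecked_catalogue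
instance (unckecked_catalogue : List (List String)) (out : List (List String)) : Decidable (Spec_same_item_variables_checker unckecked_catalogue out) := by unfold Spec_same_item_variables_checker; infer_instance

-- ===== CLAIM (what is proved, stated in full; the proofs are below) =====
def Claim_equal_same_item_variables_checker : Prop := ∀ (unckecked_catalogue : List (List String)), Dom_same_item_variables_checker unckecked_catalogue → Pre_same_item_variables_checker unckecked_catalogue → Spec_same_item_variables_checker unckecked_catalogue (same_item_variables_checker unckecked_catalogue)

-- ===== LEMMAS AND PROOFS =====

-- a processed row: ((value, constraint), identification)
-- A's outer-loop body as a function of the row rather than the index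
def rowStep (st : List String × List String × List String)
    (r : (String × String) × String) : List String × List String × List String :=
  match aFindIdx r.1.1 r.1.2 st.2.1 st.2.2 (List.range st.1.length) with
  | some j =>
      if st.1.getD j "" == r.2 then st
      else (st.1.set j (st.1.getD j "" ++ " / " ++ r.2), st.2.1, st.2.2)
  | none => (st.1 ++ [r.2], st.2.1 ++ [r.1.1], st.2.2 ++ [r.1.2])

-- the canonical "grouped" reading of a list of processed rows
def groupOf (rows : List ((String × String) × String)) (k : String × String) : List String :=
  (rows.filter (fun r => r.1 == k)).map (fun r => r.2)

def render (rows : List ((String × String) × String)) :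
    List String × List String × List String :=
  let ks := PySem.Set.ofList (rows.map (fun r => r.1))
  (ks.map (fun k => mergeAll (groupOf rows k)), ks.map (fun k => k.1), ks.map (fun k => k.2))

lemma mergeAll_append (ms : List String) (h : ms ≠ []) (s : String) :
    mergeAll (ms ++ [s]) = mergeStep (mergeAll ms) s := by
  cases ms with
  | nil => exact absurd rfl h
  | cons m t => simp [mergeAll, List.foldl_append]

lemma aFindIdx_map_succ (v c x y : String) (vals cons : List String) (ks : List Nat) :
    aFindIdx v c (x :: vals) (y :: cons) (ks.map Nat.succ) =
      (aFindIdx v c vals cons ks).map (· + 1) := by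
  induction ks with
  | nil => rfl
  | cons k t ih =>
      simp only [List.map_cons, aFindIdx, Nat.succ_eq_add_one, List.getD_cons_succ, ih]
      split <;> rfl

-- my own first-index function for keys (A's inner scan restated over the key list)
def keyIdx : List (String × String) → (String × String) → Option Nat
  | [], _ => none
  | k :: t, q => if k = q then some 0 else (keyIdx t q).map (· + 1)

lemma aFindIdx_keys (ks : List (String × String)) (q : String × String) :
    aFindIdx q.1 q.2 (ks.map (fun k => k.1)) (ks.map (fun k => k.2))
      (List.range ks.length) = keyIdx ks q := by
  induction ks with
  | nil => rfl
  | cons k t ih =>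
      simp only [List.map_cons, List.length_cons, List.range_succ_eq_map, aFindIdx,
        List.getD_cons_zero, keyIdx]
      by_cases hk : k = q
      · subst hk; simp
      · have hne : ¬ (k.1 == q.1 && k.2 == q.2) = true := by
          simp only [Bool.and_eq_true, beq_iff_eq]
          intro ⟨h1, h2⟩; exact hk (Prod.ext h1 h2)
        rw [if_neg hne, if_neg hk, aFindIdx_map_succ, ih]

lemma keyIdx_none_iff (ks : List (String × String)) (q : String × String) :
    keyIdx ks q = none ↔ q ∉ ks := by
  induction ks with
  | nil => simp [keyIdx]
  | cons k t ih =>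
      by_cases hk : k = q
      · subst hk; simp [keyIdx]
      · simp [keyIdx, hk, Option.map_eq_none_iff, ih, Ne.symm hk]

lemma keyIdx_some (ks : List (String × String)) (q : String × String) (j : Nat)
    (h : keyIdx ks q = some j) : j < ks.length ∧ ks[j]? = some q := by
  induction ks generalizing j with
  | nil => simp [keyIdx] at h
  | cons k t ih =>
      simp only [keyIdx] at h
      by_cases hk : k = q
      · rw [if_pos hk] at h
        cases h
        exact ⟨Nat.succ_pos _, by simp [hk]⟩
      · rw [if_neg hk] at h
        cases hkt : keyIdx t q with
        | none => rw [hkt] at h; simp at h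
        | some j' =>
            rw [hkt] at h
            simp only [Option.map_some] at h
            cases h
            obtain ⟨hlt, hget⟩ := ih j' hkt
            exact ⟨by simpa using Nat.succ_lt_succ hlt, by simpa using hget⟩

lemma groupOf_ne_nil (rows : List ((String × String) × String)) (k : String × String)
    (h : k ∈ rows.map (fun r => r.1)) : groupOf rows k ≠ [] := by
  obtain ⟨r, hr, rfl⟩ := List.mem_map.mp h
  have hmem : r ∈ rows.filter (fun x => x.1 == r.1) := List.mem_filter.mpr ⟨hr, by simp⟩
  exact List.ne_nil_of_mem (List.mem_map_of_mem hmem)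

lemma groupOf_append (rows : List ((String × String) × String))
    (r : (String × String) × String) (k : String × String) :
    groupOf (rows ++ [r]) k =
      if r.1 = k then groupOf rows k ++ [r.2] else groupOf rows k := by
  simp only [groupOf, List.filter_append]
  by_cases h : r.1 = k
  · simp [h]
  · simp [h]

lemma groupOf_cons (r : (String × String) × String)
    (rows : List ((String × String) × String)) (k : String × String) :
    groupOf (r :: rows) k = if r.1 = k then r.2 :: groupOf rows k else groupOf rows k := by
  simp only [groupOf]
  by_cases h : r.1 = k
  · simp [h]
  · simp [h]

lemma groupOf_eq_nil (rows : List ((String × String) × String)) (k : String × String)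
    (h : k ∉ rows.map (fun r => r.1)) : groupOf rows k = [] := by
  simp only [groupOf, List.map_eq_nil_iff, List.filter_eq_nil_iff]
  intro r hr
  simp only [beq_iff_eq]
  intro heq
  exact h (List.mem_map.mpr ⟨r, hr, heq⟩)

lemma mergeAll_cons_dup (s : String) (ms : List String) :
    mergeAll (s :: s :: ms) = mergeAll (s :: ms) := by
  simp [mergeAll, mergeStep]

-- the key step: one iteration of A's loop commutes with the grouped reading
lemma rowStep_render (rows : List ((String × String) × String))
    (r : (String × String) × String) :
    rowStep (render rows) r = render (rows ++ [r]) := by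
  unfold rowStep render
  simp only [List.length_map, aFindIdx_keys, List.map_append, List.map_cons,
    List.map_nil, PySem.Set.ofList_append_singleton]
  have hnd : (PySem.Set.ofList (rows.map (fun r => r.1))).Nodup := PySem.Set.nodup_ofList _
  rcases hfind : keyIdx (PySem.Set.ofList (rows.map (fun r => r.1))) r.1 with _ | j
  · -- new key: A appends; the grouped reading gains a fresh singleton bucket
    simp only [hfind]
    have hnotmem : r.1 ∉ PySem.Set.ofList (rows.map (fun r => r.1)) :=
      (keyIdx_none_iff _ _).mp hfind
    have hnotrows : r.1 ∉ rows.map (fun r => r.1) :=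
      fun h => hnotmem ((PySem.Set.mem_ofList _ _).mpr h)
    rw [PySem.Set.add_of_not_mem hnotmem]
    simp only [List.map_append, List.map_cons, List.map_nil]
    refine Prod.ext ?_ (Prod.ext rfl rfl)
    have hfr : mergeAll (groupOf (rows ++ [r]) r.1) = r.2 := by
      rw [groupOf_append, if_pos rfl, groupOf_eq_nil _ _ hnotrows]
      rfl
    simp only [hfr]
    refine congrArg (· ++ [r.2]) ?_
    refine (List.map_congr_left ?_).symm
    intro k hk
    rw [groupOf_append, if_neg (fun h => hnotmem (by rw [h]; exact hk))]
  · -- existing key: A merges in place at index j; the bucket of that key grows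
    simp only [hfind]
    obtain ⟨hj, hget⟩ := keyIdx_some _ _ _ hfind
    have hkj : (PySem.Set.ofList (rows.map (fun r => r.1)))[j] = r.1 := by
      rw [List.getElem?_eq_getElem hj] at hget
      exact Option.some.inj hget
    have hmemks : r.1 ∈ PySem.Set.ofList (rows.map (fun r => r.1)) :=
      hkj ▸ List.getElem_mem hj
    have hmemrows : r.1 ∈ rows.map (fun r => r.1) := (PySem.Set.mem_ofList _ _).mp hmemks
    have hgne : groupOf rows r.1 ≠ [] := groupOf_ne_nil _ _ hmemrows
    rw [PySem.Set.add_of_mem hmemks]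
    have hgetd :
        ((PySem.Set.ofList (rows.map (fun r => r.1))).map
          (fun k => mergeAll (groupOf rows k))).getD j "" = mergeAll (groupOf rows r.1) := by
      rw [List.getD_eq_getElem _ _ (by simpa using hj), List.getElem_map, hkj]
    have hmap :
        (PySem.Set.ofList (rows.map (fun r => r.1))).map
            (fun k => mergeAll (groupOf (rows ++ [r]) k)) =
          ((PySem.Set.ofList (rows.map (fun r => r.1))).map
            (fun k => mergeAll (groupOf rows k))).set j
              (mergeStep (mergeAll (groupOf rows r.1)) r.2) := by
      apply List.ext_getElem (by simp)
      intro i h1 h2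
      rw [List.getElem_set]
      by_cases hij : j = i
      · subst hij
        rw [if_pos rfl, List.getElem_map, hkj, groupOf_append, if_pos rfl,
          mergeAll_append _ hgne]
      · rw [if_neg hij, List.getElem_map, List.getElem_map]
        have hne : r.1 ≠ (PySem.Set.ofList (rows.map (fun r => r.1)))[i]'(by simpa using h1) := by
          intro h
          exact hij ((List.Nodup.getElem_inj_iff hnd).mp (hkj.trans h))
        rw [groupOf_append, if_neg hne]
    rw [hgetd]
    by_cases hb : mergeAll (groupOf rows r.1) = r.2
    · rw [if_pos (beq_iff_eq.mpr hb)]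
      refine Prod.ext ?_ (Prod.ext rfl rfl)
      rw [hmap]
      have : mergeStep (mergeAll (groupOf rows r.1)) r.2 = mergeAll (groupOf rows r.1) := by
        simp [mergeStep, hb]
      rw [this, ← hgetd, List.getD_eq_getElem _ _ (by simpa using hj),
        List.set_getElem_self]
    · rw [if_neg (by simpa [beq_iff_eq] using hb)]
      refine Prod.ext ?_ (Prod.ext rfl rfl)
      rw [hmap]
      have : mergeStep (mergeAll (groupOf rows r.1)) r.2 =
          mergeAll (groupOf rows r.1) ++ " / " ++ r.2 := by
        simp [mergeStep, hb]
      rw [this]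

lemma foldl_rowStep_render (rs rows : List ((String × String) × String)) :
    rs.foldl rowStep (render rows) = render (rows ++ rs) := by
  induction rs generalizing rows with
  | nil => simp
  | cons r t ih =>
      rw [List.foldl_cons, rowStep_render, ih]
      congr 1
      simp

-- a duplicated head row is absorbed by the grouped reading
lemma render_cons_dup (r : (String × String) × String)
    (rest : List ((String × String) × String)) :
    render (r :: r :: rest) = render (r :: rest) := by
  unfold render
  have hks : PySem.Set.ofList ((r :: r :: rest).map (fun x => x.1)) =
      PySem.Set.ofList ((r :: rest).map (fun x => x.1)) := by
    simp only [List.map_cons, PySem.Set.ofList_eq_foldl, List.foldl_cons]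
    congr 1
    exact PySem.Set.add_of_mem (by simp)
  have hmerge : ∀ k, mergeAll (groupOf (r :: r :: rest) k) = mergeAll (groupOf (r :: rest) k) := by
    intro k
    by_cases h : r.1 = k
    · simp [groupOf_cons, h, mergeAll_cons_dup]
    · simp [groupOf_cons, h]
  simp only [hks, hmerge]

-- A's index loop, read as a loop over the processed rows
lemma foldl_aStep_eq (u0 u1 u2 : List String)
    (st : List String × List String × List String) (l : List Nat) :
    l.foldl (aStep u0 u1 u2) st =
      (l.map (fun i => ((u1.getD i "", u2.getD i ""), u0.getD i ""))).foldl rowStep st := by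
  rw [List.foldl_map]
  rfl

-- B's grouping loop, read as a loop over the processed rows
lemma foldl_gstep_eq (u0 u1 u2 : List String)
    (d : PySem.Dict (String × String) (List String)) (l : List Nat) :
    l.foldl (fun d i => d.modify (u1.getD i "", u2.getD i "") [] (· ++ [u0.getD i ""])) d =
      (l.map (fun i => ((u1.getD i "", u2.getD i ""), u0.getD i ""))).foldl
        (fun d p => d.modify p.1 [] (· ++ [p.2])) d := by
  rw [List.foldl_map]

lemma render_singleton (r : (String × String) × String) :
    render [r] = ([r.2], [r.1.1], [r.1.2]) := by
  simp [render, groupOf, PySem.Set.ofList_eq_foldl, PySem.Set.add, mergeAll]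

-- the grouped reading of the rows IS B's finished groups dictionary
lemma render_eq_groups (Q : List ((String × String) × String)) :
    (fun st => ([st.1, st.2.1, st.2.2] : List (List String))) (render Q) =
    (fun g : PySem.Dict (String × String) (List String) =>
        [g.values.map mergeAll, g.keys.map (fun k => k.1), g.keys.map (fun k => k.2)])
      (Q.foldl (fun d p => d.modify p.1 [] (· ++ [p.2])) PySem.Dict.empty) := by
  have hkeys : (Q.foldl (fun d p => d.modify p.1 [] (· ++ [p.2]))
        (PySem.Dict.empty : PySem.Dict (String × String) (List String))).keys =
      PySem.Set.ofList (Q.map (fun r => r.1)) := by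
    rw [PySem.Dict.keys_foldl_modify_key]
    simp [PySem.Dict.keys_empty, PySem.Set.update_nil_left]
  have hnd : (Q.foldl (fun d p => d.modify p.1 [] (· ++ [p.2]))
        (PySem.Dict.empty : PySem.Dict (String × String) (List String))).keys.Nodup := by
    rw [hkeys]; exact PySem.Set.nodup_ofList _
  have hget : ∀ k, (Q.foldl (fun d p => d.modify p.1 [] (· ++ [p.2]))
        (PySem.Dict.empty : PySem.Dict (String × String) (List String))).getD k [] =
      groupOf Q k := by
    intro k
    rw [PySem.Dict.getD_foldl_modify_append]
    simp [PySem.Dict.getD_empty, groupOf]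
  simp only [render, PySem.Dict.values,
    PySem.Dict.items_eq_map_keys _ hnd ([] : List String), hkeys, List.map_map]
  simp [Function.comp, hget]

-- the whole equivalence, stated over the three extracted rows
lemma main_core (u0 u1 u2 : List String) (hlen : 1 ≤ u0.length) :
    (fun st => ([st.1, st.2.1, st.2.2] : List (List String)))
      ((List.range u0.length).foldl (aStep u0 u1 u2)
        ([u0.getD 0 ""], [u1.getD 0 ""], [u2.getD 0 ""])) =
    (fun g : PySem.Dict (String × String) (List String) =>
        [g.values.map mergeAll, g.keys.map (fun k => k.1), g.keys.map (fun k => k.2)])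
      ((List.range u0.length).foldl
        (fun d i => d.modify (u1.getD i "", u2.getD i "") [] (· ++ [u0.getD i ""]))
        PySem.Dict.empty) := by
  obtain ⟨m, hm⟩ : ∃ m, u0.length = m + 1 := ⟨u0.length - 1, by omega⟩
  rw [foldl_aStep_eq, foldl_gstep_eq,
    show ([u0.getD 0 ""], [u1.getD 0 ""], [u2.getD 0 ""]) =
      render [((u1.getD 0 "", u2.getD 0 ""), u0.getD 0 "")] from (render_singleton ((u1.getD 0 "", u2.getD 0 ""), u0.getD 0 "")).symm,
    foldl_rowStep_render, List.singleton_append]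
  simp only [hm, List.range_succ_eq_map, List.map_cons]
  rw [render_cons_dup]
  exact render_eq_groups _

-- ===== VERDICT (by name: the statement is the Claim_ definition above) =====
theorem same_item_variables_checker_spec : Claim_equal_same_item_variables_checker := by
  intro u _ hpre
  unfold Spec_same_item_variables_checker
  exact main_core (u.getD 0 []) (u.getD 1 []) (u.getD 2 []) hpre.2.1
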